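-- pv_equiv track=rewrite | github.com/rikyborg/wacqt | classical/simulators/sim_notch.py | _is_regular
-- ===== SOURCE A (Python) =====
-- def _is_regular(n):
--     """ Test whether n is a regular number.
--
--     Args:
--         n (int)
--
--     Returns:
--         (bool)
--
--     Regular numbers are also known as 5-smooth numbers or Hamming numbers.
--     They are the numbers whose only prime divisors are 2, 3, and 5.
--     The FFT of arrays whose length is a regular number can be calculated
--     efficiently, see https://doi.org/10.1137/0913039 and
--     http://www.fftw.org/fftw3_doc/Complex-DFTs.html#Complex-DFTs
--
--     See also:
--         closest_regular
--         next_regular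
--         previous_regular
--     """
--     while not (n % 2):
--         n //= 2
--     while not (n % 3):
--         n //= 3
--     while not (n % 5):
--         n //= 5
--     return n == 1
-- ===== SOURCE B (Python) =====
-- def _is_regular(n):
--     """Regular (5-smooth) test: recursive — peel one smallest prime factor
--     among 2, 3, 5 per step instead of three separate exhausting while-loops."""
--     if n == 1:
--         return True
--     for p in (2, 3, 5):
--         if n % p == 0:
--             return _is_regular(n // p)
--     return False
-- ===== Notes on version B (the rewrite author's own statement) =====
-- stated objective: alternative
-- what changed: Three sequential while-loops (exhaust factor 2, then 3, then 5, then compare to 1) are replaced by a single recursion that returns True at 1 and otherwise peels one factor of the first of 2,3,5 that divides n, returning False when none does.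
import Mathlib
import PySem

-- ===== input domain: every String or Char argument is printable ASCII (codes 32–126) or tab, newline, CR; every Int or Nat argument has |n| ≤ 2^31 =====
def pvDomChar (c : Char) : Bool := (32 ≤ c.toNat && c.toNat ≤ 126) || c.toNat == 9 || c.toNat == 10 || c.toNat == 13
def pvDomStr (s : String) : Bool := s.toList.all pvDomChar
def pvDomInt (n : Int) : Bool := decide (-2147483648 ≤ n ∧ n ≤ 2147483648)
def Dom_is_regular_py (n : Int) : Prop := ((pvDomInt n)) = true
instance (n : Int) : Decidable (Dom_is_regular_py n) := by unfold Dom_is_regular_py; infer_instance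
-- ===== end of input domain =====

-- B replaces A's three prime-exhausting while-loops by one recursion peeling a single
-- smallest dividing prime of 2,3,5 per step (objective: alternative decomposition).

-- termination helper cited by both ports' decreasing_by
theorem pvStripDec {p n : Int} (hp : 2 ≤ p) (hn : n ≠ 0) (hd : p ∣ n) :
    (PySem.Int.floordiv n p).natAbs < n.natAbs := by
  rw [PySem.Int.floordiv_eq_ediv_of_pos (by omega)]
  obtain ⟨m, rfl⟩ := hd
  have hp0 : p ≠ 0 := by omega
  rw [Int.mul_ediv_cancel_left _ hp0, Int.natAbs_mul]
  have hm : m.natAbs ≠ 0 := by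
    simp only [ne_eq, Int.natAbs_eq_zero]
    rintro rfl; simp at hn
  have : 2 ≤ p.natAbs := by omega
  nlinarith [Nat.pos_of_ne_zero hm]

-- ===== PORT A =====
-- one 'while not (n % p): n //= p' loop of A (used with p = 2, 3, 5);
-- the '2 ≤ p' and 'n ≠ 0' guards only make the loop total: A's calls have 2 ≤ p,
-- and on n = 0 Python loops forever (excluded by Pre_)
def pyStripLoop (p : Int) (n : Int) : Int :=
  if h : 2 ≤ p ∧ n ≠ 0 ∧ PySem.Int.mod n p = 0 then
    pyStripLoop p (PySem.Int.floordiv n p)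
  else n
termination_by n.natAbs
decreasing_by
  exact pvStripDec h.1 h.2.1 ((PySem.Int.mod_eq_zero_iff_dvd _ _).mp h.2.2)

def is_regular_py (n : Int) : Bool :=
  decide (pyStripLoop 5 (pyStripLoop 3 (pyStripLoop 2 n)) = 1)

-- ===== PORT B =====
-- recursion of Source B: return True at 1, else divide by the first of 2,3,5 dividing n
-- and recurse, else False; the 'n ≠ 0' guards only make it total (on n = 0 Python
-- recurses forever; excluded by Pre_)
def is_regular_py_alt (n : Int) : Bool :=
  if n = 1 then true
  else if h2 : n ≠ 0 ∧ PySem.Int.mod n 2 = 0 then is_regular_py_alt (PySem.Int.floordiv n 2)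
  else if h3 : n ≠ 0 ∧ PySem.Int.mod n 3 = 0 then is_regular_py_alt (PySem.Int.floordiv n 3)
  else if h5 : n ≠ 0 ∧ PySem.Int.mod n 5 = 0 then is_regular_py_alt (PySem.Int.floordiv n 5)
  else false
termination_by n.natAbs
decreasing_by
  · exact pvStripDec (by norm_num) h2.1 ((PySem.Int.mod_eq_zero_iff_dvd _ _).mp h2.2)
  · exact pvStripDec (by norm_num) h3.1 ((PySem.Int.mod_eq_zero_iff_dvd _ _).mp h3.2)
  · exact pvStripDec (by norm_num) h5.1 ((PySem.Int.mod_eq_zero_iff_dvd _ _).mp h5.2)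

-- ===== PRECONDITION & SPEC =====
-- Pre_ excludes only n = 0, on which both Pythons loop/recurse forever (A never returns)
def Pre_is_regular_py (n : Int) : Prop := n ≠ 0
instance (n : Int) : Decidable (Pre_is_regular_py n) := by unfold Pre_is_regular_py; infer_instance
def pvWitness_is_regular_py : Int := 12

def Spec_is_regular_py (n : Int) (out : Bool) : Prop := out = is_regular_py_alt n
instance (n : Int) (out : Bool) : Decidable (Spec_is_regular_py n out) := by unfold Spec_is_regular_py; infer_instance

-- ===== CLAIM (what is proved, stated in full; the proofs are below) =====
def Claim_equal_is_regular_py : Prop := ∀ (n : Int), Dom_is_regular_py n → Pre_is_regular_py n → Spec_is_regular_py n (is_regular_py n)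

-- ===== LEMMAS AND PROOFS =====

-- n is 5-smooth (positive with prime divisors among 2, 3, 5)
def pvSmooth (n : Int) : Prop := ∃ a b c : ℕ, n = 2 ^ a * 3 ^ b * 5 ^ c

theorem pvNot2 (b c : ℕ) : ¬ (2 : Int) ∣ 3 ^ b * 5 ^ c := by
  intro h
  rcases (Int.prime_two.dvd_mul).mp h with h' | h'
  · have h3 := Int.prime_two.dvd_of_dvd_pow h'; omega
  · have h5 := Int.prime_two.dvd_of_dvd_pow h'; omega

theorem pvNot3 (c : ℕ) : ¬ (3 : Int) ∣ 5 ^ c := by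
  intro h
  have := Int.prime_three.dvd_of_dvd_pow h
  omega

theorem pvNot5one : ¬ (5 : Int) ∣ 1 := by
  intro h
  have := Int.le_of_dvd one_pos h
  omega

theorem pyStripLoop_spec {p n : Int} (hp : 2 ≤ p) (hn : n ≠ 0) :
    ∃ k : ℕ, n = p ^ k * pyStripLoop p n ∧ ¬ p ∣ pyStripLoop p n ∧ pyStripLoop p n ≠ 0 := by
  revert hn
  induction n using pyStripLoop.induct (p := p) with
  | case1 n h ih =>
    intro _
    obtain ⟨-, hn0, hmod⟩ := h
    have hd : p ∣ n := (PySem.Int.mod_eq_zero_iff_dvd _ _).mp hmod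
    have hp0 : p ≠ 0 := by omega
    have hfd : PySem.Int.floordiv n p = n / p :=
      PySem.Int.floordiv_eq_ediv_of_pos (by omega)
    have hq : n / p ≠ 0 := by
      intro h0
      have := Int.ediv_mul_cancel hd
      rw [h0] at this; simp at this; exact hn0 this.symm
    rw [hfd] at ih
    obtain ⟨k, hk, hnd, hne⟩ := ih hq
    rw [pyStripLoop, dif_pos ⟨hp, hn0, hmod⟩, hfd]
    refine ⟨k + 1, ?_, hnd, hne⟩
    have := Int.mul_ediv_cancel' hd
    calc n = p * (n / p) := this.symm
    _ = p * (p ^ k * pyStripLoop p (n / p)) := by rw [← hk]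
    _ = p ^ (k + 1) * pyStripLoop p (n / p) := by ring
  | case2 n h =>
    intro hn
    rw [pyStripLoop, dif_neg h]
    refine ⟨0, by ring, ?_, hn⟩
    intro hd
    exact h ⟨hp, hn, (PySem.Int.mod_eq_zero_iff_dvd _ _).mpr hd⟩

theorem pyStripLoop_of_not_dvd {p n : Int} (h : ¬ p ∣ n) : pyStripLoop p n = n := by
  rw [pyStripLoop, dif_neg]
  rintro ⟨-, -, hmod⟩
  exact h ((PySem.Int.mod_eq_zero_iff_dvd _ _).mp hmod)

theorem pyStripLoop_pow_mul {p : Int} (hp : 2 ≤ p) (k : ℕ) {m : Int} (hm : m ≠ 0) :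
    pyStripLoop p (p ^ k * m) = pyStripLoop p m := by
  induction k with
  | zero => simp
  | succ k ih =>
    have hp0 : p ≠ 0 := by omega
    have hx : p ^ k * m ≠ 0 := mul_ne_zero (pow_ne_zero _ hp0) hm
    have hcond : 2 ≤ p ∧ p * (p ^ k * m) ≠ 0 ∧ PySem.Int.mod (p * (p ^ k * m)) p = 0 :=
      ⟨hp, mul_ne_zero hp0 hx, (PySem.Int.mod_eq_zero_iff_dvd _ _).mpr ⟨p ^ k * m, rfl⟩⟩
    rw [show p ^ (k + 1) * m = p * (p ^ k * m) by ring, pyStripLoop, dif_pos hcond,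
      PySem.Int.floordiv_eq_ediv_of_pos (by omega), Int.mul_ediv_cancel_left _ hp0, ih]

theorem pvA_iff {n : Int} (hn : n ≠ 0) : is_regular_py n = true ↔ pvSmooth n := by
  constructor
  · intro h
    simp only [is_regular_py, decide_eq_true_eq] at h
    obtain ⟨a, ha, -, h2ne⟩ := pyStripLoop_spec (p := 2) (by norm_num) hn
    obtain ⟨b, hb, -, h3ne⟩ := pyStripLoop_spec (p := 3) (by norm_num) h2ne
    obtain ⟨c, hc, -, -⟩ := pyStripLoop_spec (p := 5) (by norm_num) h3ne
    rw [h] at hc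
    refine ⟨a, b, c, ?_⟩
    rw [ha, hb, hc]; ring
  · rintro ⟨a, b, c, rfl⟩
    have h35 : (3 : Int) ^ b * 5 ^ c ≠ 0 := by positivity
    have h5 : (5 : Int) ^ c ≠ 0 := by positivity
    simp only [is_regular_py, decide_eq_true_eq]
    rw [show (2:Int) ^ a * 3 ^ b * 5 ^ c = 2 ^ a * (3 ^ b * 5 ^ c) by ring,
      pyStripLoop_pow_mul (by norm_num) a h35,
      pyStripLoop_of_not_dvd (pvNot2 b c),
      pyStripLoop_pow_mul (by norm_num) b h5,
      pyStripLoop_of_not_dvd (pvNot3 c),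
      show (5:Int) ^ c = 5 ^ c * 1 by ring,
      pyStripLoop_pow_mul (by norm_num) c one_ne_zero,
      pyStripLoop_of_not_dvd pvNot5one]

theorem pvB_iff {n : Int} (hn : n ≠ 0) : is_regular_py_alt n = true ↔ pvSmooth n := by
  revert hn
  induction n using is_regular_py_alt.induct with
  | case1 => exact fun _ => ⟨fun _ => ⟨0, 0, 0, by norm_num⟩, fun _ => by rw [is_regular_py_alt]; simp⟩
  | case2 n h1 h2 ih =>
    intro hn
    obtain ⟨hn0, hmod⟩ := h2
    have hd : (2 : Int) ∣ n := (PySem.Int.mod_eq_zero_iff_dvd _ _).mp hmod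
    have hfd : PySem.Int.floordiv n 2 = n / 2 := PySem.Int.floordiv_eq_ediv_of_pos (by norm_num)
    have hq : n / 2 ≠ 0 := by
      intro h0; have := Int.mul_ediv_cancel' hd; rw [h0] at this; simp at this; exact hn0 this.symm
    rw [hfd] at ih
    rw [is_regular_py_alt, if_neg h1, dif_pos ⟨hn0, hmod⟩, hfd, ih hq]
    constructor
    · rintro ⟨a, b, c, hm⟩
      exact ⟨a + 1, b, c, by rw [← Int.mul_ediv_cancel' hd, hm]; ring⟩
    · rintro ⟨a, b, c, rfl⟩
      cases a with
      | zero => exact absurd hd (by simpa using pvNot2 b c)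
      | succ a =>
        refine ⟨a, b, c, ?_⟩
        rw [show (2:Int) ^ (a+1) * 3 ^ b * 5 ^ c = 2 * (2 ^ a * 3 ^ b * 5 ^ c) by ring,
          Int.mul_ediv_cancel_left _ (by norm_num)]
  | case3 n h1 h2 h3 ih =>
    intro hn
    obtain ⟨hn0, hmod⟩ := h3
    have hnd2 : ¬ (2 : Int) ∣ n := fun hd =>
      h2 ⟨hn0, (PySem.Int.mod_eq_zero_iff_dvd _ _).mpr hd⟩
    have hd : (3 : Int) ∣ n := (PySem.Int.mod_eq_zero_iff_dvd _ _).mp hmod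
    have hfd : PySem.Int.floordiv n 3 = n / 3 := PySem.Int.floordiv_eq_ediv_of_pos (by norm_num)
    have hq : n / 3 ≠ 0 := by
      intro h0; have := Int.mul_ediv_cancel' hd; rw [h0] at this; simp at this; exact hn0 this.symm
    rw [hfd] at ih
    rw [is_regular_py_alt, if_neg h1, dif_neg h2, dif_pos ⟨hn0, hmod⟩, hfd, ih hq]
    constructor
    · rintro ⟨a, b, c, hm⟩
      exact ⟨a, b + 1, c, by rw [← Int.mul_ediv_cancel' hd, hm]; ring⟩
    · rintro ⟨a, b, c, rfl⟩
      cases a with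
      | succ a =>
        exact absurd ⟨2 ^ a * 3 ^ b * 5 ^ c, by ring⟩ hnd2
      | zero =>
        cases b with
        | zero => exact absurd hd (by simpa using pvNot3 c)
        | succ b =>
          refine ⟨0, b, c, ?_⟩
          rw [show (2:Int) ^ 0 * 3 ^ (b+1) * 5 ^ c = 3 * (2 ^ 0 * 3 ^ b * 5 ^ c) by ring,
            Int.mul_ediv_cancel_left _ (by norm_num)]
  | case4 n h1 h2 h3 h4 ih =>
    intro hn
    obtain ⟨hn0, hmod⟩ := h4
    have hnd2 : ¬ (2 : Int) ∣ n := fun hd =>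
      h2 ⟨hn0, (PySem.Int.mod_eq_zero_iff_dvd _ _).mpr hd⟩
    have hnd3 : ¬ (3 : Int) ∣ n := fun hd =>
      h3 ⟨hn0, (PySem.Int.mod_eq_zero_iff_dvd _ _).mpr hd⟩
    have hd : (5 : Int) ∣ n := (PySem.Int.mod_eq_zero_iff_dvd _ _).mp hmod
    have hfd : PySem.Int.floordiv n 5 = n / 5 := PySem.Int.floordiv_eq_ediv_of_pos (by norm_num)
    have hq : n / 5 ≠ 0 := by
      intro h0; have := Int.mul_ediv_cancel' hd; rw [h0] at this; simp at this; exact hn0 this.symm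
    rw [hfd] at ih
    rw [is_regular_py_alt, if_neg h1, dif_neg h2, dif_neg h3, dif_pos ⟨hn0, hmod⟩, hfd, ih hq]
    constructor
    · rintro ⟨a, b, c, hm⟩
      exact ⟨a, b, c + 1, by rw [← Int.mul_ediv_cancel' hd, hm]; ring⟩
    · rintro ⟨a, b, c, rfl⟩
      cases a with
      | succ a => exact absurd ⟨2 ^ a * 3 ^ b * 5 ^ c, by ring⟩ hnd2
      | zero =>
        cases b with
        | succ b => exact absurd ⟨2 ^ 0 * 3 ^ b * 5 ^ c, by ring⟩ hnd3
        | zero =>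
          cases c with
          | zero => simp at h1
          | succ c =>
            refine ⟨0, 0, c, ?_⟩
            rw [show (2:Int) ^ 0 * 3 ^ 0 * 5 ^ (c+1) = 5 * (2 ^ 0 * 3 ^ 0 * 5 ^ c) by ring,
              Int.mul_ediv_cancel_left _ (by norm_num)]
  | case5 n h1 h2 h3 h4 =>
    intro hn
    rw [is_regular_py_alt, if_neg h1, dif_neg h2, dif_neg h3, dif_neg h4]
    simp only [Bool.false_eq_true, false_iff]
    rintro ⟨a, b, c, rfl⟩
    have hnd2 : ¬ (2 : Int) ∣ 2 ^ a * 3 ^ b * 5 ^ c := fun hd =>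
      h2 ⟨hn, (PySem.Int.mod_eq_zero_iff_dvd _ _).mpr hd⟩
    have hnd3 : ¬ (3 : Int) ∣ 2 ^ a * 3 ^ b * 5 ^ c := fun hd =>
      h3 ⟨hn, (PySem.Int.mod_eq_zero_iff_dvd _ _).mpr hd⟩
    have hnd5 : ¬ (5 : Int) ∣ 2 ^ a * 3 ^ b * 5 ^ c := fun hd =>
      h4 ⟨hn, (PySem.Int.mod_eq_zero_iff_dvd _ _).mpr hd⟩
    cases a with
    | succ a => exact hnd2 ⟨2 ^ a * 3 ^ b * 5 ^ c, by ring⟩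
    | zero =>
      cases b with
      | succ b => exact hnd3 ⟨2 ^ 0 * 3 ^ b * 5 ^ c, by ring⟩
      | zero =>
        cases c with
        | succ c => exact hnd5 ⟨2 ^ 0 * 3 ^ 0 * 5 ^ c, by ring⟩
        | zero => simp at h1

-- ===== VERDICT (by name: the statement is the Claim_ definition above) =====
theorem is_regular_py_spec : Claim_equal_is_regular_py := by
  intro n _ hpre
  unfold Spec_is_regular_py
  have hA := pvA_iff hpre
  have hB := pvB_iff hpre
  rw [Bool.eq_iff_iff, hA, hB]
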